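-- pv_equiv track=rewrite | github.com/ext-maru/ai-co | elders_guild/elder_tree/elder_servants/dwarf_tribe/tools/batch-long-line-fix.py | _contains_long_string
-- ===== SOURCE A (Python) =====
-- def _contains_long_string(line: str) -> bool:
--     """長い文字列リテラルを含むかチェック"""
--     quotes = ['"', "'"]
--     for quote in quotes:
--         if line.count(quote) >= 2:
--             start = line.find(quote)
--             end = line.rfind(quote)
--             if start < end and (end - start) > 60:
--                 return True
--     return False
-- ===== SOURCE B (Python) =====
-- def _contains_long_string(line: str) -> bool:
--     """True iff some quote character reoccurs more than 60 characters later."""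
--     return any(ch in '"\'' and ch in line[i + 61:] for i, ch in enumerate(line))
-- ===== Notes on version B (the rewrite author's own statement) =====
-- stated objective: simpler
-- what changed: Replaces the per-quote count/find/rfind staged scans with a one-line any() over enumerate(line) asking whether the character is a quote that occurs again in line[i+61:], i.e. whether some quote reoccurs more than 60 positions later.
import Mathlib
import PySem

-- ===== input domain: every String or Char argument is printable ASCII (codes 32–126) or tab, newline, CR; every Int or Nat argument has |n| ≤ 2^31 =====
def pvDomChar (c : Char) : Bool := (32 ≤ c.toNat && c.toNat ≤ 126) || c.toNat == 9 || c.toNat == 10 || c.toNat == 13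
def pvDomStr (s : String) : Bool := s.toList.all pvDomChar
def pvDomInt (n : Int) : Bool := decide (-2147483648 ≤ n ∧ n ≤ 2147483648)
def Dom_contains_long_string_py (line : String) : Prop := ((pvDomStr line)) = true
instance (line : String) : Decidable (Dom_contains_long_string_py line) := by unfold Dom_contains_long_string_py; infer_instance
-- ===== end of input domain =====

-- B replaces A's per-quote count/find/rfind staged scans with a single any() over
-- enumerate(line): is some character a quote that occurs again in line[i+61:]?
-- (objective: simpler — one membership condition instead of staged scans).

-- ===== PORT A =====
-- the 'for quote in quotes' loop with early 'return True'
def pvAGo (line : String) : List String → Bool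
  | [] => false
  | q :: qs =>
    if 2 ≤ PySem.Str.count line q then
      let start := PySem.Str.find line q
      let e := PySem.Str.rfind line q
      if start < e ∧ e - start > 60 then true else pvAGo line qs
    else pvAGo line qs

def contains_long_string_py (line : String) : Bool :=
  pvAGo line ["\"", "'"]

-- ===== PORT B =====
-- any(ch in '"\'' and ch in line[i + 61:] for i, ch in enumerate(line))
def contains_long_string_py_alt (line : String) : Bool :=
  (PySem.List.enumerate line.toList 0).any (fun p =>
    PySem.Chars.isIn [p.2] ['"', '\''] &&
    PySem.Chars.isIn [p.2] (PySem.Chars.slice line.toList (some (p.1 + 61)) none))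

-- ===== PRECONDITION & SPEC =====
def Spec_contains_long_string_py (line : String) (out : Bool) : Prop := out = contains_long_string_py_alt line
instance (line : String) (out : Bool) : Decidable (Spec_contains_long_string_py line out) := by unfold Spec_contains_long_string_py; infer_instance

-- ===== CLAIM (what is proved, stated in full; the proofs are below) =====
def Claim_equal_contains_long_string_py : Prop := ∀ (line : String), Dom_contains_long_string_py line → Spec_contains_long_string_py line (contains_long_string_py line)

-- ===== LEMMAS AND PROOFS =====

-- first / last occurrence index of a character (proof-side characterisations)
def pvFirst? (c : Char) : List Char → Option Nat
  | [] => none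
  | a :: t => if a = c then some 0 else (pvFirst? c t).map (· + 1)

def pvLast? (c : Char) : List Char → Option Nat
  | [] => none
  | a :: t =>
    match pvLast? c t with
    | some j => some (j + 1)
    | none => if a = c then some 0 else none

theorem pvFirst?_eq_none_iff (c : Char) (l : List Char) : pvFirst? c l = none ↔ l.count c = 0 := by
  induction l with
  | nil => simp [pvFirst?]
  | cons a t ih =>
    by_cases h : a = c
    · simp [pvFirst?, h, List.count_cons]
    · simp [pvFirst?, h, List.count_cons, Option.map_eq_none_iff, ih]

theorem pvLast?_eq_none_iff (c : Char) (l : List Char) : pvLast? c l = none ↔ l.count c = 0 := by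
  induction l with
  | nil => simp [pvLast?]
  | cons a t ih =>
    cases ht : pvLast? c t with
    | some j => simp [pvLast?, ht, List.count_cons]; rw [ht] at ih; simp at ih; omega
    | none =>
      rw [ht] at ih; simp at ih
      by_cases h : a = c
      · simp [pvLast?, ht, List.count_cons, h, ih]
      · simp [pvLast?, ht, List.count_cons, h, ih]

theorem pvFirst?_eq_pvLast?_of_count_one (c : Char) (l : List Char) (h : l.count c = 1) :
    pvFirst? c l = pvLast? c l := by
  induction l with
  | nil => simp [pvFirst?, pvLast?]
  | cons a t ih =>
    by_cases ha : a = c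
    · have : t.count c = 0 := by simp [List.count_cons, ha] at h; omega
      have h1 := (pvLast?_eq_none_iff c t).mpr this
      have h2 := (pvFirst?_eq_none_iff c t).mpr this
      simp [pvFirst?, pvLast?, ha, h1]
    · have : t.count c = 1 := by simp [List.count_cons, ha] at h; omega
      have := ih this
      cases ht : pvLast? c t with
      | some j => simp [pvFirst?, pvLast?, ha, ht, this]
      | none => exact absurd ((pvLast?_eq_none_iff c t).mp ht) (by omega)

-- A-side: count / find / rfind on a single-character needle
theorem pvCountGo (c : Char) : ∀ (fuel : Nat) (l : List Char) (acc : Nat), l.length ≤ fuel →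
    PySem.Chars.count.go [c] fuel l acc = acc + l.count c := by
  intro fuel
  induction fuel with
  | zero => intro l acc h; cases l with
    | nil => simp [PySem.Chars.count.go]
    | cons a t => simp at h
  | succ n ih =>
    intro l acc h
    cases l with
    | nil => simp [PySem.Chars.count.go]
    | cons a t =>
      by_cases hac : a = c
      · have : [c].isPrefixOf (a :: t) = true := by simp [List.isPrefixOf, hac]
        simp only [PySem.Chars.count.go, this, if_pos]
        have hdrop : List.drop [c].length (a :: t) = t := rfl
        rw [hdrop, ih t (acc+1) (by simpa using h)]
        simp [List.count_cons, hac]; omega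
      · have : [c].isPrefixOf (a :: t) = false := by simp [List.isPrefixOf]; simpa using fun h => absurd h.symm hac
        simp only [PySem.Chars.count.go, this]
        rw [if_neg (by simp [this])]
        rw [ih t acc (by simpa using h)]
        simp [List.count_cons, hac]

theorem pvCount_singleton (c : Char) (l : List Char) :
    PySem.Chars.count l [c] = l.count c := by
  simp [PySem.Chars.count, pvCountGo c l.length l 0 le_rfl]

theorem pvFindGo (c : Char) : ∀ (l : List Char) (k : Nat),
    PySem.Chars.find.go [c] l k = (match pvFirst? c l with
      | some j => ((k + j : Nat) : Int)
      | none => -1) := by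
  intro l
  induction l with
  | nil => intro k; simp [PySem.Chars.find.go, pvFirst?]
  | cons a t ih =>
    intro k
    by_cases hac : a = c
    · have : [c].isPrefixOf (a :: t) = true := by simp [List.isPrefixOf, hac]
      simp [PySem.Chars.find.go, this, pvFirst?, hac]
    · have : [c].isPrefixOf (a :: t) = false := by simp [List.isPrefixOf]; simpa using fun h => absurd h.symm hac
      rw [show PySem.Chars.find.go [c] (a :: t) k =
        if [c].isPrefixOf (a :: t) then (k : Int) else PySem.Chars.find.go [c] t (k+1) from rfl]
      rw [this]
      simp only [Bool.false_eq_true, if_false]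
      rw [ih (k+1)]
      cases h : pvFirst? c t with
      | some j => simp [pvFirst?, hac, h]; push_cast; ring
      | none => simp [pvFirst?, hac, h]

theorem pvFind_singleton (c : Char) (l : List Char) :
    PySem.Chars.find l [c] = (match pvFirst? c l with
      | some j => (j : Int)
      | none => -1) := by
  have := pvFindGo c l 0
  simpa [PySem.Chars.find] using this

theorem pvLast?_snoc (c a : Char) (l : List Char) :
    pvLast? c (l ++ [a]) = if a = c then some l.length else pvLast? c l := by
  induction l with
  | nil => by_cases h : a = c <;> simp [pvLast?, h]
  | cons b t ih =>
    simp only [List.cons_append, pvLast?, ih]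
    by_cases h : a = c
    · simp [h]
    · simp [h]

set_option maxRecDepth 4096 in
theorem pvRfindGo (c : Char) (l : List Char) : ∀ (j : Nat),
    PySem.Chars.rfind.go l [c] j = (match pvLast? c (l.take (j+1)) with
      | some i => (i : Int)
      | none => -1) := by
  intro j
  induction j with
  | zero =>
    rw [show PySem.Chars.rfind.go l [c] 0 = if [c].isPrefixOf l then (0:Int) else -1 from rfl]
    cases l with
    | nil => simp [pvLast?, List.isPrefixOf]
    | cons a t =>
      by_cases hac : a = c
      · simp [List.isPrefixOf, hac, pvLast?, List.take_succ_cons, List.take_zero]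
      · have : ([c].isPrefixOf (a :: t)) = false := by simp [List.isPrefixOf]; simpa using fun h => absurd h.symm hac
        simp [this, pvLast?, List.take, hac]
  | succ j ih =>
    rw [show PySem.Chars.rfind.go l [c] (j+1) =
      if [c].isPrefixOf (l.drop (j+1)) then ((j+1 : Nat) : Int) else PySem.Chars.rfind.go l [c] j from rfl]
    by_cases hj : j + 1 < l.length
    · have hgd : l.drop (j+1) = l[j+1] :: l.drop (j+2) := by
        rw [List.drop_eq_getElem_cons hj]
      have htake : l.take (j+1+1) = l.take (j+1) ++ [l[j+1]] := by
        rw [List.take_add_one, List.getElem?_eq_getElem hj]; rfl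
      by_cases hc : l[j+1] = c
      · have : [c].isPrefixOf (l.drop (j+1)) = true := by rw [hgd]; simp [List.isPrefixOf, hc]
        rw [this]
        simp only [if_true]
        rw [htake, pvLast?_snoc, if_pos hc, List.length_take, Nat.min_eq_left (le_of_lt hj)]
      · have : [c].isPrefixOf (l.drop (j+1)) = false := by
          rw [hgd]; simp [List.isPrefixOf]; exact fun h => absurd h.symm hc
        rw [this]
        simp only [Bool.false_eq_true, if_false]
        rw [ih, htake, pvLast?_snoc]
        simp [hc]
    · have hd : l.drop (j+1) = [] := List.drop_eq_nil_of_le (by omega)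
      have : [c].isPrefixOf (l.drop (j+1)) = false := by simp [hd, List.isPrefixOf]
      rw [this]
      simp only [Bool.false_eq_true, if_false]
      rw [ih]
      have h1 : l.take (j+1+1) = l := List.take_of_length_le (by omega)
      have h2 : l.take (j+1) = l := List.take_of_length_le (by omega)
      rw [h1, h2]

theorem pvRfind_singleton (c : Char) (l : List Char) :
    PySem.Chars.rfind l [c] = (match pvLast? c l with
      | some i => (i : Int)
      | none => -1) := by
  rw [show PySem.Chars.rfind l [c] = PySem.Chars.rfind.go l [c] l.length from rfl]
  rw [pvRfindGo]
  rw [List.take_of_length_le (by omega)]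

-- A's per-quote condition, stated through pvFirst?/pvLast?
theorem pvACond (c : Char) (l : List Char) :
    ((2 ≤ PySem.Chars.count l [c] ∧
       PySem.Chars.find l [c] < PySem.Chars.rfind l [c] ∧
       PySem.Chars.rfind l [c] - PySem.Chars.find l [c] > 60) ↔
     (∃ f t, pvFirst? c l = some f ∧ pvLast? c l = some t ∧ (t : Int) - (f : Int) > 60)) := by
  rw [pvCount_singleton, pvFind_singleton, pvRfind_singleton]
  cases hf : pvFirst? c l with
  | none =>
    have h0 := (pvFirst?_eq_none_iff c l).mp hf
    constructor
    · rintro ⟨h2, _⟩; omega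
    · rintro ⟨f, t, hf', _⟩; simp [hf] at hf'
  | some f =>
    cases ht : pvLast? c l with
    | none =>
      have h0 := (pvLast?_eq_none_iff c l).mp ht
      have := (pvFirst?_eq_none_iff c l).mpr h0
      rw [hf] at this; cases this
    | some t =>
      have hpos : l.count c ≠ 0 := by
        intro h; have := (pvFirst?_eq_none_iff c l).mpr h; rw [hf] at this; cases this
      constructor
      · rintro ⟨_, hlt, hgt⟩
        exact ⟨f, t, rfl, rfl, by simpa using hgt⟩
      · rintro ⟨f', t', hf', ht', hgt⟩
        obtain rfl := Option.some.inj hf'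
        obtain rfl := Option.some.inj ht'
        have hne : f ≠ t := by omega
        have h2 : 2 ≤ l.count c := by
          rcases Nat.lt_or_ge (l.count c) 2 with h | h
          · have h1 : l.count c = 1 := by omega
            have heq := pvFirst?_eq_pvLast?_of_count_one c l h1
            rw [hf, ht] at heq
            exact absurd (Option.some.inj heq) hne
          · exact h
        refine ⟨h2, by simp; omega, by simp; omega⟩

-- A's per-quote step, rewritten through pvFirst?/pvLast?
theorem pvAquote (line q : String) (c : Char) (hq : q.toList = [c]) (rest : Bool) :
    (if 2 ≤ PySem.Str.count line q then
       (if PySem.Str.find line q < PySem.Str.rfind line q ∧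
           PySem.Str.rfind line q - PySem.Str.find line q > 60 then true
        else rest)
     else rest)
    = ((match pvFirst? c line.toList, pvLast? c line.toList with
        | some f, some t => decide ((t : Int) - (f : Int) > 60)
        | _, _ => false) || rest) := by
  rw [show PySem.Str.count line q = PySem.Chars.count line.toList [c] by
        rw [PySem.Str.count_eq, hq],
      show PySem.Str.find line q = PySem.Chars.find line.toList [c] by
        rw [PySem.Str.find_eq, hq],
      show PySem.Str.rfind line q = PySem.Chars.rfind line.toList [c] by
        rw [PySem.Str.rfind_eq, hq]]
  cases hf : pvFirst? c line.toList with
  | none =>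
    have h0 : line.toList.count c = 0 := (pvFirst?_eq_none_iff _ _).mp hf
    have hn : ¬ 2 ≤ PySem.Chars.count line.toList [c] := by
      rw [pvCount_singleton]; omega
    rw [if_neg hn]
    cases hl : pvLast? c line.toList <;> simp
  | some f =>
    cases hl : pvLast? c line.toList with
    | none =>
      have h0 := (pvLast?_eq_none_iff c line.toList).mp hl
      have := (pvFirst?_eq_none_iff c line.toList).mpr h0
      rw [hf] at this; cases this
    | some t =>
      by_cases hgt : (t : Int) - (f : Int) > 60
      · have hcond := (pvACond c line.toList).mpr ⟨f, t, hf, hl, hgt⟩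
        rw [if_pos hcond.1, if_pos ⟨hcond.2.1, hcond.2.2⟩]
        simp [hgt]
      · have h1 : ¬ (PySem.Chars.find line.toList [c] < PySem.Chars.rfind line.toList [c] ∧
            PySem.Chars.rfind line.toList [c] - PySem.Chars.find line.toList [c] > 60) ∨
            ¬ 2 ≤ PySem.Chars.count line.toList [c] := by
          by_cases h2 : 2 ≤ PySem.Chars.count line.toList [c]
          · left
            intro hin
            obtain ⟨f', t', hf', ht', hgt'⟩ := (pvACond c line.toList).mp ⟨h2, hin.1, hin.2⟩
            rw [hf] at hf'; rw [hl] at ht'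
            obtain rfl := Option.some.inj hf'
            obtain rfl := Option.some.inj ht'
            exact hgt hgt'
          · right; exact h2
        rcases h1 with h1 | h1
        · by_cases h2 : 2 ≤ PySem.Chars.count line.toList [c]
          · rw [if_pos h2, if_neg h1]; simp [hgt]
          · rw [if_neg h2]; simp [hgt]
        · rw [if_neg h1]; simp [hgt]

-- A's per-quote condition as a Prop
def pvR (c : Char) (l : List Char) : Prop :=
  ∃ f t, pvFirst? c l = some f ∧ pvLast? c l = some t ∧ (t : Int) - (f : Int) > 60

-- A's result, characterised
theorem pvA_iff (line : String) :
    contains_long_string_py line = true ↔ (pvR '"' line.toList ∨ pvR '\'' line.toList) := by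
  unfold contains_long_string_py
  have e2 : pvAGo line ["'"] =
      ((match pvFirst? '\'' line.toList, pvLast? '\'' line.toList with
        | some f, some t => decide ((t : Int) - (f : Int) > 60)
        | _, _ => false) || false) := by
    rw [show pvAGo line ["'"] =
      (if 2 ≤ PySem.Str.count line "'" then
         (if PySem.Str.find line "'" < PySem.Str.rfind line "'" ∧
             PySem.Str.rfind line "'" - PySem.Str.find line "'" > 60 then true
          else pvAGo line [])
       else pvAGo line []) from rfl]
    rw [show pvAGo line [] = false from rfl]
    exact pvAquote line "'" '\'' rfl false
  rw [show pvAGo line ["\"", "'"] =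
    (if 2 ≤ PySem.Str.count line "\"" then
       (if PySem.Str.find line "\"" < PySem.Str.rfind line "\"" ∧
           PySem.Str.rfind line "\"" - PySem.Str.find line "\"" > 60 then true
        else pvAGo line ["'"])
     else pvAGo line ["'"]) from rfl]
  rw [pvAquote line "\"" '"' rfl (pvAGo line ["'"]), e2]
  unfold pvR
  cases pvFirst? '"' line.toList <;> cases pvLast? '"' line.toList <;>
    cases pvFirst? '\'' line.toList <;> cases pvLast? '\'' line.toList <;> simp

-- B's per-quote condition as a Prop: c occurs somewhere, and again > 60 positions later
def pvQ (c : Char) (l : List Char) : Prop :=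
  ∃ k, ∃ _ : k < l.length, l[k] = c ∧ c ∈ l.drop (k + 61)

-- slice from a non-negative index is drop
theorem pvSlice61 (L : List Char) (a : Int) (k : Nat) (h : a = (k : Int) + 61) :
    PySem.Chars.slice L (some a) none = L.drop (k + 61) := by
  subst h
  rw [show ((k : Int) + 61) = ((k + 61 : Nat) : Int) by push_cast; ring]
  rw [PySem.Chars.slice_eq_listSlice]
  exact PySem.List.slice_from_natCast L (k + 61)

-- membership of a single character as an infix
theorem pvSingleton_infix_iff (c : Char) (l : List Char) : [c] <:+: l ↔ c ∈ l := by
  constructor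
  · intro h; exact h.subset (by simp)
  · intro h
    obtain ⟨s, t, rfl⟩ := List.append_of_mem h
    exact ⟨s, t, by simp⟩

-- B's result, characterised
theorem pvB_iff (line : String) :
    contains_long_string_py_alt line = true ↔ (pvQ '"' line.toList ∨ pvQ '\'' line.toList) := by
  unfold contains_long_string_py_alt
  rw [List.any_eq_true]
  constructor
  · rintro ⟨p, hp, hg⟩
    obtain ⟨k, hk, rfl⟩ := (PySem.List.mem_enumerate_iff _ _ _).mp hp
    simp only [Bool.and_eq_true, PySem.Chars.isIn_iff_infix] at hg
    obtain ⟨hquote, hin⟩ := hg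
    have hq2 : line.toList[k] ∈ ['"', '\''] := (pvSingleton_infix_iff _ _).mp hquote
    rw [pvSlice61 _ _ k (by omega)] at hin
    have hmem : line.toList[k] ∈ line.toList.drop (k + 61) := (pvSingleton_infix_iff _ _).mp hin
    simp only [List.mem_cons, List.not_mem_nil, or_false] at hq2
    rcases hq2 with h | h
    · exact Or.inl ⟨k, hk, h, h ▸ hmem⟩
    · exact Or.inr ⟨k, hk, h, h ▸ hmem⟩
  · intro h
    have : ∃ c ∈ ['"', '\''], pvQ c line.toList := by
      rcases h with h | h
      · exact ⟨'"', by simp, h⟩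
      · exact ⟨'\'', by simp, h⟩
    obtain ⟨c, hc, k, hk, hkc, hmem⟩ := this
    refine ⟨((0 : Int) + (k : Int), line.toList[k]),
      (PySem.List.mem_enumerate_iff _ _ _).mpr ⟨k, hk, rfl⟩, ?_⟩
    simp only [Bool.and_eq_true, PySem.Chars.isIn_iff_infix]
    constructor
    · exact (pvSingleton_infix_iff _ _).mpr (by rw [hkc]; exact hc)
    · rw [pvSlice61 _ _ k (by omega)]
      exact (pvSingleton_infix_iff _ _).mpr (by rw [hkc]; exact hmem)

-- pvFirst?/pvLast? specs: value, bound and extremality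
theorem pvFirst?_spec (c : Char) (l : List Char) (f : Nat) (h : pvFirst? c l = some f) :
    ∃ _ : f < l.length, l[f] = c ∧ ∀ k, ∀ _ : k < l.length, l[k] = c → f ≤ k := by
  induction l generalizing f with
  | nil => simp [pvFirst?] at h
  | cons a t ih =>
    by_cases ha : a = c
    · simp [pvFirst?, ha] at h
      subst h
      exact ⟨by simp, by simpa using ha, fun k _ _ => Nat.zero_le k⟩
    · simp only [pvFirst?, if_neg ha, Option.map_eq_some_iff] at h
      obtain ⟨j, hj, rfl⟩ := h
      obtain ⟨hjl, hjc, hmin⟩ := ih j hj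
      refine ⟨by simpa using Nat.succ_lt_succ hjl, by simpa using hjc, ?_⟩
      intro k hk hkc
      cases k with
      | zero => simp at hkc; exact absurd hkc ha
      | succ m => exact Nat.succ_le_succ (hmin m (by simpa using hk) (by simpa using hkc))

theorem pvLast?_spec (c : Char) (l : List Char) (t : Nat) (h : pvLast? c l = some t) :
    ∃ _ : t < l.length, l[t] = c ∧ ∀ k, ∀ _ : k < l.length, l[k] = c → k ≤ t := by
  induction l generalizing t with
  | nil => simp [pvLast?] at h
  | cons a tl ih =>
    cases ht : pvLast? c tl with
    | some j =>
      rw [pvLast?, ht] at h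
      obtain rfl := Option.some.inj h
      obtain ⟨hjl, hjc, hmax⟩ := ih j ht
      refine ⟨by simpa using Nat.succ_lt_succ hjl, by simpa using hjc, ?_⟩
      intro k hk hkc
      cases k with
      | zero => exact Nat.zero_le _
      | succ m => exact Nat.succ_le_succ (hmax m (by simpa using hk) (by simpa using hkc))
    | none =>
      rw [pvLast?, ht] at h
      have hcnt : tl.count c = 0 := (pvLast?_eq_none_iff c tl).mp ht
      have hnomem : c ∉ tl := List.count_eq_zero.mp hcnt
      by_cases ha : a = c
      · rw [if_pos ha] at h
        obtain rfl := Option.some.inj h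
        refine ⟨by simp, by simpa using ha, ?_⟩
        intro k hk hkc
        cases k with
        | zero => exact le_rfl
        | succ m =>
          exfalso
          exact hnomem (by rw [← hkc]; exact List.getElem_mem _)
      · rw [if_neg ha] at h; cases h

-- existence of first/last from a witness occurrence
theorem pvFirst?_isSome (c : Char) (l : List Char) (h : c ∈ l) : ∃ f, pvFirst? c l = some f := by
  cases hf : pvFirst? c l with
  | none =>
    have := (pvFirst?_eq_none_iff c l).mp hf
    exact absurd this (by simpa [List.count_eq_zero] using h)
  | some f => exact ⟨f, rfl⟩

theorem pvLast?_isSome (c : Char) (l : List Char) (h : c ∈ l) : ∃ t, pvLast? c l = some t := by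
  cases hf : pvLast? c l with
  | none =>
    have := (pvLast?_eq_none_iff c l).mp hf
    exact absurd this (by simpa [List.count_eq_zero] using h)
  | some t => exact ⟨t, rfl⟩

-- the key equivalence: "first/last more than 60 apart" ↔ "some occurrence reoccurs > 60 later"
theorem pvR_iff_pvQ (c : Char) (l : List Char) : pvR c l ↔ pvQ c l := by
  constructor
  · rintro ⟨f, t, hf, ht, hgt⟩
    obtain ⟨hfl, hfc, _⟩ := pvFirst?_spec c l f hf
    obtain ⟨htl, htc, _⟩ := pvLast?_spec c l t ht
    have hft : f + 61 ≤ t := by omega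
    refine ⟨f, hfl, hfc, ?_⟩
    have : l.drop (f + 61) = l.drop (f + 61) := rfl
    have hidx : t - (f + 61) < (l.drop (f + 61)).length := by
      rw [List.length_drop]; omega
    have : (l.drop (f + 61))[t - (f + 61)] = l[t] := by
      rw [List.getElem_drop]
      congr 1
      omega
    rw [← htc, ← this]
    exact List.getElem_mem _
  · rintro ⟨k, hk, hkc, hmem⟩
    obtain ⟨j, hj⟩ := List.getElem_of_mem hmem
    obtain ⟨hjl, hjc⟩ := hj
    rw [List.getElem_drop] at hjc
    have hjlen : k + 61 + j < l.length := by
      have := hjl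
      rw [List.length_drop] at this
      omega
    have hcl : c ∈ l := by rw [← hkc]; exact List.getElem_mem _
    obtain ⟨f, hf⟩ := pvFirst?_isSome c l hcl
    obtain ⟨t, ht⟩ := pvLast?_isSome c l hcl
    obtain ⟨hfl, _, hmin⟩ := pvFirst?_spec c l f hf
    obtain ⟨htl, _, hmax⟩ := pvLast?_spec c l t ht
    have h1 : f ≤ k := hmin k hk hkc
    have h2 : k + 61 + j ≤ t := hmax (k + 61 + j) hjlen (by
      have : l[k + 61 + j] = c := by
        rw [show l[k + 61 + j] = l[k + 61 + j]'hjlen from rfl]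
        exact hjc
      exact this)
    exact ⟨f, t, hf, ht, by push_cast; omega⟩

-- ===== VERDICT (by name: the statement is the Claim_ definition above) =====
theorem contains_long_string_py_spec : Claim_equal_contains_long_string_py := by
  intro line _
  unfold Spec_contains_long_string_py
  have hA := pvA_iff line
  have hB := pvB_iff line
  have hiff : contains_long_string_py line = true ↔ contains_long_string_py_alt line = true := by
    rw [hA, hB, pvR_iff_pvQ, pvR_iff_pvQ]
  exact Bool.coe_iff_coe.mp hiff
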